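-- pv_equiv track=rewrite | github.com/puran67/algoritmusok | 1_kereses_rendezes/cloudy_day.py | maximumPeople
-- ===== SOURCE A (Python) =====
-- def maximumPeople(populations, town_locations, cloud_locations, cloud_ranges):
--     events = []
--     n = len(populations)
--
--     for i in range(n):
--         events.append((town_locations[i], 'town', populations[i], i))
--
--     for j in range(len(cloud_locations)):
--         left = cloud_locations[j] - cloud_ranges[j]
--         right = cloud_locations[j] + cloud_ranges[j]
--         events.append((left, 'cloud_start', j))
--         events.append((right + 1, 'cloud_end', j))
--
--     events.sort()
--
--     active_clouds = set()
--     cloud_population = [0] * len(cloud_locations)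
--     sunny_population = 0
--     for event in events:
--         pos, event_type, value, *extra = event
--         if event_type == 'town':
--             if len(active_clouds) == 0:
--                 sunny_population += value
--             elif len(active_clouds) == 1:
--                 cloud_idx = next(iter(active_clouds))
--                 cloud_population[cloud_idx] += value
--         elif event_type == 'cloud_start':
--             active_clouds.add(value)
--         elif event_type == 'cloud_end':
--             active_clouds.remove(value)
--
--     return sunny_population + max(cloud_population, default=0)
-- ===== SOURCE B (Python) =====
-- def maximumPeople(populations, town_locations, cloud_locations, cloud_ranges):
--     m = len(cloud_locations)
--     cloud_population = [0] * m
--     sunny_population = 0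
--     for pop, loc in zip(populations, town_locations):
--         covering = 0
--         last_cloud = -1
--         for j in range(m):
--             if abs(loc - cloud_locations[j]) <= cloud_ranges[j]:
--                 covering += 1
--                 last_cloud = j
--         if covering == 0:
--             sunny_population += pop
--         elif covering == 1:
--             cloud_population[last_cloud] += pop
--     return sunny_population + max(cloud_population, default=0)
-- ===== Notes on version B (the rewrite author's own statement) =====
-- stated objective: simpler
-- what changed: Drops A's event list, tuple sort and sweep-line with an active-cloud set; B directly counts, for each town, how many clouds cover its location (inclusive interval test |loc-c|<=r) and credits the population to sun or to the unique covering cloud.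
import Mathlib
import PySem

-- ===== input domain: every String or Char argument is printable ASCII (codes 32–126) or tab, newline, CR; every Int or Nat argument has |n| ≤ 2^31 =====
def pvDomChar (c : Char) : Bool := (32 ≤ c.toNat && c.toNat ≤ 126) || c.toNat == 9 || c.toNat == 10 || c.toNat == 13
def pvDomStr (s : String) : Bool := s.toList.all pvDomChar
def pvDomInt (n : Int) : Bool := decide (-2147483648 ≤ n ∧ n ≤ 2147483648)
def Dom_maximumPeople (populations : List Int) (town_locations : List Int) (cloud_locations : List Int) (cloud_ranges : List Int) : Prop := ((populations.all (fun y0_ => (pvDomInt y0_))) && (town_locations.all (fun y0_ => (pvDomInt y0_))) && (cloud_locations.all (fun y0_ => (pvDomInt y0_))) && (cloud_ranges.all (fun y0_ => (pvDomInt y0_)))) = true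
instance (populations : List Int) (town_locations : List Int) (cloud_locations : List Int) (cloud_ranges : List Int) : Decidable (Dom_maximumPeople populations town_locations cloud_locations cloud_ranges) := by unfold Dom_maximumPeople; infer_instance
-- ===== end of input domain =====

-- B replaces A's event-list + tuple-sort + sweep-line by a direct per-town count of covering clouds: simpler, no sort, no active set.

-- ===== PORT A =====
-- Python sorts heterogeneous tuples: towns are 4-tuples (pos, 'town', pop, i), cloud events 3-tuples
-- (pos, tag, j).  We encode every event as Int × String × Int × Int (cloud events get 0 in the unused 4th
-- slot); since no two distinct events ever agree on the first three components, the 4th slot is compared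
-- by Python only between two town events, where it is the index i in both encodings — so the lexicographic
-- key below orders the encoded events exactly as Python orders the original tuples.  String comparison is
-- keyed through .toList (code-point lexicographic, exactly Python's str ordering).
def pvEventKey (e : Int × String × Int × Int) : Lex (Int × Lex (List Char × Lex (Int × Int))) :=
  toLex (e.1, toLex (e.2.1.toList, toLex (e.2.2.1, e.2.2.2)))

def pvStep (st : PySem.Set Int × List Int × Int) (e : Int × String × Int × Int) :
    PySem.Set Int × List Int × Int :=
  if e.2.1 = "town" then
    if st.1.length = 0 then (st.1, st.2.1, st.2.2 + e.2.2.1)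
    else if st.1.length = 1 then
      -- next(iter(s)) on a singleton set: its unique element
      let cloud_idx := st.1.headD 0
      (st.1, PySem.List.pySetD st.2.1 cloud_idx (PySem.List.pyGetD st.2.1 cloud_idx 0 + e.2.2.1), st.2.2)
    else st
  else if e.2.1 = "cloud_start" then (PySem.Set.add st.1 e.2.2.1, st.2.1, st.2.2)
  else if e.2.1 = "cloud_end" then
    -- set.remove: none = KeyError, unreachable under Pre_ (every range ≥ 0 puts the start before the end)
    ((PySem.Set.remove? st.1 e.2.2.1).getD st.1, st.2.1, st.2.2)
  else st

def maximumPeople (populations : List Int) (town_locations : List Int) (cloud_locations : List Int) (cloud_ranges : List Int) : Int :=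
  let n := populations.length
  let events : List (Int × String × Int × Int) := (List.range n).foldl (fun acc (i : Nat) =>
      acc ++ [(PySem.List.pyGetD town_locations (i : Int) 0, "town",
               PySem.List.pyGetD populations (i : Int) 0, (i : Int))]) []
  let events := (List.range cloud_locations.length).foldl (fun acc (j : Nat) =>
      acc ++ [(PySem.List.pyGetD cloud_locations (j : Int) 0 - PySem.List.pyGetD cloud_ranges (j : Int) 0,
               "cloud_start", (j : Int), (0 : Int)),
              (PySem.List.pyGetD cloud_locations (j : Int) 0 + PySem.List.pyGetD cloud_ranges (j : Int) 0 + 1,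
               "cloud_end", (j : Int), (0 : Int))]) events
  let sortedEvents := PySem.List.sorted events pvEventKey
  let final := sortedEvents.foldl pvStep (PySem.Set.empty, List.replicate cloud_locations.length 0, 0)
  final.2.2 + PySem.List.maxD final.2.1 (fun x => x) 0

-- ===== PORT B =====
def maximumPeople_alt (populations : List Int) (town_locations : List Int) (cloud_locations : List Int) (cloud_ranges : List Int) : Int :=
  let m := cloud_locations.length
  let final := (populations.zip town_locations).foldl (fun (st : List Int × Int) pt =>
      let co := (PySem.List.pyRange 0 m 1).foldl (fun (co : Int × Int) j =>
          if |pt.2 - PySem.List.pyGetD cloud_locations j 0| ≤ PySem.List.pyGetD cloud_ranges j 0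
          then (co.1 + 1, j) else co) (0, -1)
      if co.1 = 0 then (st.1, st.2 + pt.1)
      else if co.1 = 1 then
        (PySem.List.pySetD st.1 co.2 (PySem.List.pyGetD st.1 co.2 0 + pt.1), st.2)
      else st) (List.replicate m 0, 0)
  final.2 + PySem.List.maxD final.1 (fun x => x) 0

-- ===== PRECONDITION & SPEC =====
-- Pre_ excludes exactly the inputs on which the Python A raises: an IndexError when populations is longer
-- than town_locations or cloud_locations longer than cloud_ranges, and a KeyError when some cloud range is
-- negative (that cloud's end event sorts before its start event, so set.remove fails).
def Pre_maximumPeople (populations : List Int) (town_locations : List Int) (cloud_locations : List Int) (cloud_ranges : List Int) : Prop :=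
  populations.length ≤ town_locations.length ∧ cloud_locations.length ≤ cloud_ranges.length ∧
    ∀ j : Nat, j < cloud_locations.length → (0 : Int) ≤ cloud_ranges.getD j 0
instance (populations : List Int) (town_locations : List Int) (cloud_locations : List Int) (cloud_ranges : List Int) : Decidable (Pre_maximumPeople populations town_locations cloud_locations cloud_ranges) := by unfold Pre_maximumPeople; infer_instance
def pvWitness_maximumPeople : List Int × List Int × List Int × List Int := ([3, 1, 2], [0, 5, 9], [4, 8], [2, 1])

def Spec_maximumPeople (populations : List Int) (town_locations : List Int) (cloud_locations : List Int) (cloud_ranges : List Int) (out : Int) : Prop := out = maximumPeople_alt populations town_locations cloud_locations cloud_ranges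
instance (populations : List Int) (town_locations : List Int) (cloud_locations : List Int) (cloud_ranges : List Int) (out : Int) : Decidable (Spec_maximumPeople populations town_locations cloud_locations cloud_ranges out) := by unfold Spec_maximumPeople; infer_instance

-- ===== CLAIM (what is proved, stated in full; the proofs are below) =====
def Claim_equal_maximumPeople : Prop := ∀ (populations : List Int) (town_locations : List Int) (cloud_locations : List Int) (cloud_ranges : List Int), Dom_maximumPeople populations town_locations cloud_locations cloud_ranges → Pre_maximumPeople populations town_locations cloud_locations cloud_ranges → Spec_maximumPeople populations town_locations cloud_locations cloud_ranges (maximumPeople populations town_locations cloud_locations cloud_ranges)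
-- ===== LEMMAS AND PROOFS =====

-- The canonical description both programs are reduced to: the list of cloud indices covering a location,
-- and the resulting sun / per-cloud population sums over a list of (population, location) pairs.
def pvCovers (cl cr : List Int) (loc : Int) : List Nat :=
  (List.range cl.length).filter (fun jn => decide (|loc - cl.getD jn 0| ≤ cr.getD jn 0))

def pvSunny (cl cr : List Int) (ts : List (Int × Int)) : Int :=
  (ts.map (fun t => if pvCovers cl cr t.2 = [] then t.1 else 0)).sum

def pvCloudPop (cl cr : List Int) (ts : List (Int × Int)) (jn : Nat) : Int :=
  (ts.map (fun t => if pvCovers cl cr t.2 = [jn] then t.1 else 0)).sum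

-- the three kinds of events of A
def pvTev (populations tl : List Int) (i : Nat) : Int × String × Int × Int :=
  (tl.getD i 0, "town", populations.getD i 0, (i : Int))
def pvSev (cl cr : List Int) (j : Nat) : Int × String × Int × Int :=
  (cl.getD j 0 - cr.getD j 0, "cloud_start", (j : Int), 0)
def pvEev (cl cr : List Int) (j : Nat) : Int × String × Int × Int :=
  (cl.getD j 0 + cr.getD j 0 + 1, "cloud_end", (j : Int), 0)

def pvE (populations tl cl cr : List Int) : List (Int × String × Int × Int) :=
  (List.range populations.length).map (pvTev populations tl) ++
    (List.range cl.length).flatMap (fun j => [pvSev cl cr j, pvEev cl cr j])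

def pvTownsOf (u : List (Int × String × Int × Int)) : List (Int × Int) :=
  u.filterMap (fun e => if e.2.1 = "town" then some (e.2.2.1, e.1) else none)

-- A's sweep state after processing the prefix u of the sorted event list
def pvInv (cl cr : List Int) (u : List (Int × String × Int × Int))
    (st : PySem.Set Int × List Int × Int) : Prop :=
  (∀ x : Int, x ∈ st.1 ↔ ∃ jn : Nat, jn < cl.length ∧ x = (jn : Int) ∧
      pvSev cl cr jn ∈ u ∧ pvEev cl cr jn ∉ u) ∧
  st.1.Nodup ∧
  st.2.1.length = cl.length ∧
  (∀ jn : Nat, jn < cl.length → st.2.1.getD jn 0 = pvCloudPop cl cr (pvTownsOf u) jn) ∧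
  st.2.2 = pvSunny cl cr (pvTownsOf u)

lemma pvKey_start_town (a x y p v i : Int) :
    pvEventKey (a, "cloud_start", x, y) < pvEventKey (p, "town", v, i) ↔ a ≤ p := by
  have h1 : "cloud_start".toList < "town".toList := by decide
  have h2 : "cloud_start".toList ≠ "town".toList := by decide
  simp only [pvEventKey, Prod.Lex.toLex_lt_toLex, h1, h2]
  simp only [and_true, false_and, or_false]
  omega

lemma pvKey_end_town (a x y p v i : Int) :
    pvEventKey (a, "cloud_end", x, y) < pvEventKey (p, "town", v, i) ↔ a ≤ p := by
  have h1 : "cloud_end".toList < "town".toList := by decide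
  have h2 : "cloud_end".toList ≠ "town".toList := by decide
  simp only [pvEventKey, Prod.Lex.toLex_lt_toLex, h1, h2]
  simp only [and_true, false_and, or_false]
  omega

lemma pvKey_start_end (a x y b x' y' : Int) :
    pvEventKey (a, "cloud_start", x, y) < pvEventKey (b, "cloud_end", x', y') ↔ a < b := by
  have h1 : ¬ ("cloud_start".toList < "cloud_end".toList) := by decide
  have h2 : "cloud_start".toList ≠ "cloud_end".toList := by decide
  simp only [pvEventKey, Prod.Lex.toLex_lt_toLex, h1, h2]
  simp only [false_and, and_false, or_false]

lemma pvKey_end_start (b x y a x' y' : Int) :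
    pvEventKey (b, "cloud_end", x, y) < pvEventKey (a, "cloud_start", x', y') ↔ b ≤ a := by
  have h1 : "cloud_end".toList < "cloud_start".toList := by decide
  have h2 : "cloud_end".toList ≠ "cloud_start".toList := by decide
  simp only [pvEventKey, Prod.Lex.toLex_lt_toLex, h1, h2]
  simp only [and_true, false_and, or_false]
  omega

lemma pvEventKey_inj : Function.Injective pvEventKey := by
  rintro ⟨a1, s1, v1, i1⟩ ⟨a2, s2, v2, i2⟩ h
  simp only [pvEventKey, toLex_inj, Prod.mk.injEq] at h
  obtain ⟨h1, h2, h3, h4⟩ := h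
  exact Prod.ext h1 (Prod.ext (String.toList_inj.mp h2) (Prod.ext h3 h4))

lemma pvTev_inj (populations tl : List Int) : Function.Injective (pvTev populations tl) := by
  intro i i' h
  have := congrArg (fun e => e.2.2.2) h
  simpa [pvTev] using this

lemma pvCloud_nodup (cl cr : List Int) : ∀ L : List Nat, L.Nodup →
    (L.flatMap (fun j => [pvSev cl cr j, pvEev cl cr j])).Nodup := by
  intro L
  induction L with
  | nil => simp
  | cons j L ih =>
    intro h
    rw [List.nodup_cons] at h
    simp only [List.flatMap_cons]
    rw [List.nodup_append]
    refine ⟨by simp [pvSev, pvEev], ih h.2, ?_⟩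
    intro a ha b hb
    simp only [List.mem_flatMap, List.mem_cons, List.not_mem_nil, or_false] at ha hb
    obtain ⟨j', hj', hb'⟩ := hb
    have hjj : j ≠ j' := fun hEq => h.1 (hEq ▸ hj')
    rcases ha with rfl | rfl <;> rcases hb' with rfl | rfl <;> intro hEq
    · exact hjj (by have := congrArg (fun e => e.2.2.1) hEq; simpa [pvSev] using this)
    · have := congrArg (fun e => e.2.1) hEq; simp [pvSev, pvEev] at this
    · have := congrArg (fun e => e.2.1) hEq; simp [pvSev, pvEev] at this
    · exact hjj (by have := congrArg (fun e => e.2.2.1) hEq; simpa [pvEev] using this)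

lemma pvE_nodup (populations tl cl cr : List Int) : (pvE populations tl cl cr).Nodup := by
  unfold pvE
  rw [List.nodup_append]
  refine ⟨List.Nodup.map (pvTev_inj populations tl) List.nodup_range,
    pvCloud_nodup cl cr _ List.nodup_range, ?_⟩
  intro a ha b hb hEq
  obtain ⟨i, -, rfl⟩ := List.mem_map.mp ha
  simp only [List.mem_flatMap, List.mem_cons, List.not_mem_nil, or_false] at hb
  obtain ⟨j', -, hb'⟩ := hb
  rcases hb' with rfl | rfl
  · have := congrArg (fun e => e.2.1) hEq; simp [pvTev, pvSev] at this
  · have := congrArg (fun e => e.2.1) hEq; simp [pvTev, pvEev] at this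

-- membership in the prefix of a strictly key-sorted list
lemma pvMemPrefix {α κ : Type} [LinearOrder κ] (key : α → κ) {S u v : List α} {e x : α}
    (hS : S = u ++ e :: v) (hp : S.Pairwise (fun a b => key a < key b)) (hx : x ∈ S) :
    x ∈ u ↔ key x < key e := by
  subst hS
  rw [List.pairwise_append] at hp
  obtain ⟨-, hev, hcross⟩ := hp
  constructor
  · intro hu
    exact hcross x hu e (by simp)
  · intro hlt
    rcases List.mem_append.mp hx with hu | hev'
    · exact hu
    · rcases List.mem_cons.mp hev' with rfl | hv
      · exact absurd hlt (lt_irrefl _)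
      · exact absurd (lt_trans hlt ((List.pairwise_cons.mp hev).1 x hv)) (lt_irrefl _)

lemma pvNotMemPrefix {α κ : Type} [LinearOrder κ] (key : α → κ) {S u v : List α} {e : α}
    (hS : S = u ++ e :: v) (hp : S.Pairwise (fun a b => key a < key b)) : e ∉ u := by
  intro hu
  have := (pvMemPrefix key hS hp (by subst hS; simp)).mp hu
  exact absurd this (lt_irrefl _)

lemma pvSorted_pairwise_lt (populations tl cl cr : List Int) :
    (PySem.List.sorted (pvE populations tl cl cr) pvEventKey).Pairwise
      (fun a b => pvEventKey a < pvEventKey b) := by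
  have hle := PySem.List.sorted_pairwise (pvE populations tl cl cr) pvEventKey
  have hnd : (PySem.List.sorted (pvE populations tl cl cr) pvEventKey).Nodup :=
    (PySem.List.sorted_perm _ _ _).nodup_iff.mpr (pvE_nodup populations tl cl cr)
  exact (hle.and hnd).imp (fun {a b} h =>
    lt_of_le_of_ne h.1 (fun hk => h.2 (pvEventKey_inj hk)))

-- facts about pvCovers
lemma pvMem_covers (cl cr : List Int) (loc : Int) (jn : Nat) :
    jn ∈ pvCovers cl cr loc ↔ jn < cl.length ∧ |loc - cl.getD jn 0| ≤ cr.getD jn 0 := by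
  simp [pvCovers, List.mem_filter, List.mem_range]

lemma pvCovers_nodup (cl cr : List Int) (loc : Int) : (pvCovers cl cr loc).Nodup :=
  List.nodup_range.filter _

lemma pvCloudPop_cons (cl cr : List Int) (t : Int × Int) (ts : List (Int × Int)) (jn : Nat) :
    pvCloudPop cl cr (t :: ts) jn =
      (if pvCovers cl cr t.2 = [jn] then t.1 else 0) + pvCloudPop cl cr ts jn := by
  simp [pvCloudPop]

lemma pvSunny_cons (cl cr : List Int) (t : Int × Int) (ts : List (Int × Int)) :
    pvSunny cl cr (t :: ts) =
      (if pvCovers cl cr t.2 = [] then t.1 else 0) + pvSunny cl cr ts := by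
  simp [pvSunny]

-- shape of the members of pvE
lemma pvE_cases {populations tl cl cr : List Int} {e : Int × String × Int × Int}
    (he : e ∈ pvE populations tl cl cr) :
    (∃ i : Nat, i < populations.length ∧ e = pvTev populations tl i) ∨
      (∃ j : Nat, j < cl.length ∧ (e = pvSev cl cr j ∨ e = pvEev cl cr j)) := by
  simp only [pvE, List.mem_append, List.mem_map, List.mem_flatMap, List.mem_range,
    List.mem_cons, List.not_mem_nil, or_false] at he
  rcases he with ⟨i, hi, rfl⟩ | ⟨j, hj, h⟩
  · exact Or.inl ⟨i, hi, rfl⟩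
  · exact Or.inr ⟨j, hj, h⟩

lemma pvSev_mem (populations tl cl cr : List Int) {j : Nat} (hj : j < cl.length) :
    pvSev cl cr j ∈ pvE populations tl cl cr := by
  simp only [pvE, List.mem_append, List.mem_flatMap, List.mem_range]
  exact Or.inr ⟨j, hj, by simp⟩

lemma pvEev_mem (populations tl cl cr : List Int) {j : Nat} (hj : j < cl.length) :
    pvEev cl cr j ∈ pvE populations tl cl cr := by
  simp only [pvE, List.mem_append, List.mem_flatMap, List.mem_range]
  exact Or.inr ⟨j, hj, by simp⟩

-- tags tell the three event kinds apart, the index component tells same-kind events apart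
lemma pvSev_ne_town (cl cr : List Int) (jn : Nat) (e : Int × String × Int × Int)
    (he : e.2.1 = "town") : pvSev cl cr jn ≠ e := by
  intro h; rw [← h] at he; simp [pvSev] at he
lemma pvEev_ne_town (cl cr : List Int) (jn : Nat) (e : Int × String × Int × Int)
    (he : e.2.1 = "town") : pvEev cl cr jn ≠ e := by
  intro h; rw [← h] at he; simp [pvEev] at he
lemma pvSev_ne_eev (cl cr cl' cr' : List Int) (jn jn' : Nat) :
    pvSev cl cr jn ≠ pvEev cl' cr' jn' := by
  intro h; have := congrArg (fun e => e.2.1) h; simp [pvSev, pvEev] at this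
lemma pvSev_inj_idx {cl cr : List Int} {jn jn' : Nat} (h : pvSev cl cr jn = pvSev cl cr jn') :
    jn = jn' := by
  have := congrArg (fun e => e.2.2.1) h; simpa [pvSev] using this
lemma pvEev_inj_idx {cl cr : List Int} {jn jn' : Nat} (h : pvEev cl cr jn = pvEev cl cr jn') :
    jn = jn' := by
  have := congrArg (fun e => e.2.2.1) h; simpa [pvEev] using this

-- pvTownsOf through an appended event
lemma pvTownsOf_append_town (u : List (Int × String × Int × Int)) (a v i : Int) :
    pvTownsOf (u ++ [(a, "town", v, i)]) = pvTownsOf u ++ [(v, a)] := by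
  simp [pvTownsOf, List.filterMap_append]
lemma pvTownsOf_append_nontown (u : List (Int × String × Int × Int))
    (e : Int × String × Int × Int) (he : e.2.1 ≠ "town") :
    pvTownsOf (u ++ [e]) = pvTownsOf u := by
  simp [pvTownsOf, List.filterMap_append, he]
lemma pvCloudPop_append (cl cr : List Int) (ts : List (Int × Int)) (t : Int × Int) (jn : Nat) :
    pvCloudPop cl cr (ts ++ [t]) jn =
      pvCloudPop cl cr ts jn + (if pvCovers cl cr t.2 = [jn] then t.1 else 0) := by
  simp [pvCloudPop]
lemma pvSunny_append (cl cr : List Int) (ts : List (Int × Int)) (t : Int × Int) :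
    pvSunny cl cr (ts ++ [t]) =
      pvSunny cl cr ts + (if pvCovers cl cr t.2 = [] then t.1 else 0) := by
  simp [pvSunny]

-- the step of A's sweep preserves the invariant
lemma pvStepInv (populations tl cl cr : List Int)
    (hcr : ∀ j : Nat, j < cl.length → (0 : Int) ≤ cr.getD j 0)
    (S u v : List (Int × String × Int × Int)) (e : Int × String × Int × Int)
    (st : PySem.Set Int × List Int × Int)
    (hS : S = u ++ e :: v)
    (hp : S.Pairwise (fun a b => pvEventKey a < pvEventKey b))
    (hmem : ∀ x, x ∈ S ↔ x ∈ pvE populations tl cl cr)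
    (hInv : pvInv cl cr u st) : pvInv cl cr (u ++ [e]) (pvStep st e) := by
  obtain ⟨hA, hN, hL, hCP, hSu⟩ := hInv
  have hpre : ∀ x ∈ pvE populations tl cl cr, (x ∈ u ↔ pvEventKey x < pvEventKey e) :=
    fun x hx => pvMemPrefix pvEventKey hS hp ((hmem x).mpr hx)
  have henotu : e ∉ u := pvNotMemPrefix pvEventKey hS hp
  have heE : e ∈ pvE populations tl cl cr := (hmem e).mp (by rw [hS]; simp)
  rcases pvE_cases heE with ⟨i, hi, rfl⟩ | ⟨j, hj, hse | hse⟩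
  · -- town event
    set pos := tl.getD i 0 with hpos
    set pv := populations.getD i 0 with hpv
    -- the active set is exactly the set of clouds covering pos
    have hActive : ∀ x : Int, x ∈ st.1 ↔
        x ∈ (pvCovers cl cr pos).map (fun jn : Nat => (jn : Int)) := by
      intro x
      rw [hA x]
      constructor
      · rintro ⟨jn, hjn, rfl, hsu, heu⟩
        have h1 := (hpre _ (pvSev_mem populations tl cl cr hjn)).mp hsu
        rw [pvSev, pvTev, pvKey_start_town] at h1
        have h2 : ¬ (pvEventKey (pvEev cl cr jn) < pvEventKey (pvTev populations tl i)) :=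
          fun hlt => heu ((hpre _ (pvEev_mem populations tl cl cr hjn)).mpr hlt)
        rw [pvEev, pvTev, pvKey_end_town] at h2
        exact List.mem_map.mpr ⟨jn, (pvMem_covers cl cr pos jn).mpr
          ⟨hjn, by rw [abs_le]; omega⟩, rfl⟩
      · intro hx
        obtain ⟨jn, hmemC, rfl⟩ := List.mem_map.mp hx
        obtain ⟨hjn, habs⟩ := (pvMem_covers cl cr pos jn).mp hmemC
        rw [abs_le] at habs
        refine ⟨jn, hjn, rfl, ?_, ?_⟩
        · exact (hpre _ (pvSev_mem populations tl cl cr hjn)).mpr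
            (by rw [pvSev, pvTev, pvKey_start_town]; omega)
        · intro heu
          have := (hpre _ (pvEev_mem populations tl cl cr hjn)).mp heu
          rw [pvEev, pvTev, pvKey_end_town] at this
          omega
    have hPerm : st.1.Perm ((pvCovers cl cr pos).map (fun jn : Nat => (jn : Int))) :=
      (List.perm_ext_iff_of_nodup hN
        ((pvCovers_nodup cl cr pos).map (fun a b => Int.natCast_inj.mp))).mpr hActive
    have hlen : st.1.length = (pvCovers cl cr pos).length := by
      simpa using hPerm.length_eq
    -- the appended event is a town event: the active-set clauses are unchanged
    have hA' : ∀ x : Int, x ∈ st.1 ↔ ∃ jn : Nat, jn < cl.length ∧ x = (jn : Int) ∧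
        pvSev cl cr jn ∈ u ++ [pvTev populations tl i] ∧
        pvEev cl cr jn ∉ u ++ [pvTev populations tl i] := by
      intro x
      rw [hA x]
      constructor
      · rintro ⟨jn, hjn, rfl, hsu, heu⟩
        refine ⟨jn, hjn, rfl, List.mem_append.mpr (Or.inl hsu), ?_⟩
        intro hmem'
        rcases List.mem_append.mp hmem' with h | h
        · exact heu h
        · exact pvEev_ne_town cl cr jn _ rfl (List.mem_singleton.mp h)
      · rintro ⟨jn, hjn, rfl, hsu, heu⟩
        refine ⟨jn, hjn, rfl, ?_, fun h => heu (List.mem_append.mpr (Or.inl h))⟩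
        rcases List.mem_append.mp hsu with h | h
        · exact h
        · exact absurd (List.mem_singleton.mp h) (pvSev_ne_town cl cr jn _ rfl)
    have hTowns : pvTownsOf (u ++ [(tl.getD i 0, "town", populations.getD i 0, (i : Int))]) =
        pvTownsOf u ++ [(pv, pos)] := pvTownsOf_append_town u pos pv (i : Int)
    rcases hK : pvCovers cl cr pos with - | ⟨j0, K'⟩
    · -- sunny town
      have h0 : st.1.length = 0 := by rw [hlen, hK]; rfl
      simp only [pvStep, pvTev, reduceIte, h0]
      exact ⟨hA', hN, hL, fun jn hjn => by
          rw [hCP jn hjn, hTowns, pvCloudPop_append, hK, if_neg (by simp), add_zero],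
        by rw [hSu, hTowns, pvSunny_append, hK, if_pos rfl]⟩
    · rcases hK' : K' with - | ⟨j1, K''⟩
      · -- exactly one covering cloud j0
        subst hK'
        have hst1 : st.1 = [(j0 : Int)] := by
          have h' := hPerm
          rw [hK] at h'
          simpa [List.perm_singleton] using h' 
        have hj0 : j0 < cl.length :=
          ((pvMem_covers cl cr pos j0).mp (hK ▸ List.mem_cons_self)).1
        simp only [pvStep, pvTev, reduceIte, hst1, List.length_cons, List.length_nil, zero_add,
          List.headD_cons]
        rw [if_neg (by decide : ¬ ((1 : Nat) = 0))]
        refine ⟨by simpa [← hst1] using hA', by rw [← hst1]; exact hN,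
          by rw [PySem.List.length_pySetD]; exact hL, ?_, ?_⟩
        · intro jn hjn
          rw [PySem.List.pySetD_natCast]
          have hget : (st.2.1.set j0 (PySem.List.pyGetD st.2.1 (j0 : Int) 0 + pv)).getD jn 0 =
              if jn = j0 then st.2.1.getD j0 0 + pv else st.2.1.getD jn 0 := by
            have := PySem.List.pyGetD_pySetD_natCast st.2.1 j0 jn
              (PySem.List.pyGetD st.2.1 (j0 : Int) 0 + pv) 0 (hL ▸ hj0)
            rw [PySem.List.pySetD_natCast] at this
            simpa using this
          rw [hget, hTowns, pvCloudPop_append, hK]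
          by_cases hjj : jn = j0
          · subst hjj
            rw [if_pos rfl, if_pos rfl, hCP jn hjn]
            try ring
          · rw [if_neg hjj, if_neg (by simpa using fun hEq => hjj hEq.symm), hCP jn hjn]
            ring
        · rw [hSu, hTowns, pvSunny_append, hK, if_neg (by simp), add_zero]
      · -- two or more covering clouds: nothing changes
        have h0 : st.1.length ≠ 0 := by rw [hlen, hK, hK']; simp
        have h1 : st.1.length ≠ 1 := by rw [hlen, hK, hK']; simp
        simp only [pvStep, pvTev, reduceIte]
        rw [if_neg h0, if_neg h1]
        exact ⟨hA', hN, hL, fun jn hjn => by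
            rw [hCP jn hjn, hTowns, pvCloudPop_append, if_neg (by rw [hK, hK']; simp), add_zero],
          by rw [hSu, hTowns, pvSunny_append, if_neg (by rw [hK]; simp), add_zero]⟩
  · -- cloud_start event
    subst hse
    have heM : pvEev cl cr j ∉ u := by
      intro h
      have := (hpre _ (pvEev_mem populations tl cl cr hj)).mp h
      rw [pvEev, pvSev, pvKey_end_start] at this
      have := hcr j hj
      omega
    have hTowns : pvTownsOf (u ++ [(cl.getD j 0 - cr.getD j 0, "cloud_start", ((j : Int), (0 : Int)))]) =
        pvTownsOf u := pvTownsOf_append_nontown u _ (by simp)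
    simp only [pvStep, pvSev]
    rw [if_neg (by decide : ¬ (("cloud_start" : String) = "town")), if_pos True.intro]
    refine ⟨?_, PySem.Set.nodup_add st.1 _ hN, hL,
      fun jn hjn => by rw [hCP jn hjn, hTowns], by rw [hSu, hTowns]⟩
    intro x
    simp only [PySem.Set.mem_add]
    constructor
    · rintro (hx | rfl)
      · obtain ⟨jn, hjn, rfl, hsu, heu⟩ := hA x |>.mp hx
        refine ⟨jn, hjn, rfl, List.mem_append.mpr (Or.inl hsu), ?_⟩
        intro h
        rcases List.mem_append.mp h with h | h
        · exact heu h
        · exact pvSev_ne_eev cl cr cl cr j jn (List.mem_singleton.mp h).symm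
      · exact ⟨j, hj, rfl, List.mem_append.mpr (Or.inr (by simp [pvSev])), fun h => by
          rcases List.mem_append.mp h with h | h
          · exact heM h
          · exact pvSev_ne_eev cl cr cl cr j j (List.mem_singleton.mp h).symm⟩
    · rintro ⟨jn, hjn, rfl, hsu, heu⟩
      rcases List.mem_append.mp hsu with h | h
      · exact Or.inl ((hA _).mpr ⟨jn, hjn, rfl, h, fun h' =>
          heu (List.mem_append.mpr (Or.inl h'))⟩)
      · have : jn = j := pvSev_inj_idx (List.mem_singleton.mp h)
        subst this
        exact Or.inr rfl
  · -- cloud_end event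
    subst hse
    have hjmem : (j : Int) ∈ st.1 := by
      rw [hA]
      refine ⟨j, hj, rfl, ?_, henotu⟩
      refine (hpre _ (pvSev_mem populations tl cl cr hj)).mpr ?_
      rw [pvSev, pvEev, pvKey_start_end]
      have := hcr j hj
      omega
    have hTowns : pvTownsOf (u ++ [(cl.getD j 0 + cr.getD j 0 + 1, "cloud_end", ((j : Int), (0 : Int)))]) =
        pvTownsOf u := pvTownsOf_append_nontown u _ (by simp)
    simp only [pvStep, pvEev]
    rw [if_neg (by decide : ¬ (("cloud_end" : String) = "town")),
      if_neg (by decide : ¬ (("cloud_end" : String) = "cloud_start")), if_pos True.intro]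
    rw [PySem.Set.remove?_of_mem hjmem, Option.getD_some]
    refine ⟨?_, PySem.Set.nodup_discard st.1 _ hN, hL,
      fun jn hjn => by rw [hCP jn hjn, hTowns], by rw [hSu, hTowns]⟩
    intro x
    simp only [PySem.Set.mem_discard]
    constructor
    · rintro ⟨hx, hne⟩
      obtain ⟨jn, hjn, rfl, hsu, heu⟩ := (hA _).mp hx
      have hnj : jn ≠ j := fun h => hne (by rw [h])
      refine ⟨jn, hjn, rfl, List.mem_append.mpr (Or.inl hsu), ?_⟩
      intro h
      rcases List.mem_append.mp h with h | h
      · exact heu h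
      · exact hnj (pvEev_inj_idx (List.mem_singleton.mp h))
    · rintro ⟨jn, hjn, rfl, hsu, heu⟩
      have hnj : jn ≠ j := fun h => heu (List.mem_append.mpr (Or.inr (by rw [h]; simp [pvEev])))
      refine ⟨(hA _).mpr ⟨jn, hjn, rfl, ?_, fun h' => heu (List.mem_append.mpr (Or.inl h'))⟩,
        by simpa using hnj⟩
      rcases List.mem_append.mp hsu with h | h
      · exact h
      · exact absurd (List.mem_singleton.mp h) (pvSev_ne_eev cl cr cl cr jn j)

lemma pvFoldInv (populations tl cl cr : List Int)
    (hcr : ∀ j : Nat, j < cl.length → (0 : Int) ≤ cr.getD j 0)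
    (S : List (Int × String × Int × Int))
    (hp : S.Pairwise (fun a b => pvEventKey a < pvEventKey b))
    (hmem : ∀ x, x ∈ S ↔ x ∈ pvE populations tl cl cr) :
    ∀ (v u : List (Int × String × Int × Int)) (st : PySem.Set Int × List Int × Int),
      S = u ++ v → pvInv cl cr u st → pvInv cl cr (u ++ v) (v.foldl pvStep st) := by
  intro v
  induction v with
  | nil => intro u st hS hInv; simpa using hInv
  | cons e v ih =>
    intro u st hS hInv
    have h1 := pvStepInv populations tl cl cr hcr S u v e st hS hp hmem hInv
    have h2 := ih (u ++ [e]) (pvStep st e) (by rw [hS]; simp) h1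
    simpa using h2

-- B's inner loop: count-and-remember-last over any list
lemma pvInnerLoop {α : Type} (p : α → Prop) [DecidablePred p] (L : List α) (c0 : Int) (a0 : α) :
    L.foldl (fun (co : Int × α) x => if p x then (co.1 + 1, x) else co) (c0, a0) =
      (c0 + (L.countP (fun x => decide (p x)) : Int),
        (L.filter (fun x => decide (p x))).getLast?.getD a0) := by
  induction L generalizing c0 a0 with
  | nil => simp
  | cons x L ih =>
    by_cases hx : p x
    · simp only [List.foldl_cons, List.countP_cons, List.filter_cons, hx, if_pos, decide_true,
        List.getLast?_cons, ih]
      rw [Prod.mk.injEq]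
      constructor
      · push_cast; ring
      · simp
    · simp only [List.foldl_cons, List.countP_cons, List.filter_cons, hx, decide_false,
        ih]
      simp

-- B's outer loop step (definitionally the fold body of the port of B)
def pvAltStep (cl cr : List Int) (st : List Int × Int) (pt : Int × Int) : List Int × Int :=
  let co := (PySem.List.pyRange 0 cl.length 1).foldl (fun (co : Int × Int) j =>
      if |pt.2 - PySem.List.pyGetD cl j 0| ≤ PySem.List.pyGetD cr j 0
      then (co.1 + 1, j) else co) (0, -1)
  if co.1 = 0 then (st.1, st.2 + pt.1)
  else if co.1 = 1 then
    (PySem.List.pySetD st.1 co.2 (PySem.List.pyGetD st.1 co.2 0 + pt.1), st.2)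
  else st

-- B's inner loop over range(m) counts the covering clouds and keeps the last one
lemma pvAltInner (cl cr : List Int) (loc : Int) :
    (PySem.List.pyRange 0 cl.length 1).foldl (fun (co : Int × Int) j =>
        if |loc - PySem.List.pyGetD cl j 0| ≤ PySem.List.pyGetD cr j 0
        then (co.1 + 1, j) else co) (0, -1) =
      (((pvCovers cl cr loc).length : Int),
        ((pvCovers cl cr loc).map (fun jn : Nat => (jn : Int))).getLast?.getD (-1)) := by
  rw [pvInnerLoop (fun j : Int => |loc - PySem.List.pyGetD cl j 0| ≤ PySem.List.pyGetD cr j 0)]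
  rw [PySem.List.pyRange_zero_nat]
  rw [List.countP_map, List.filter_map]
  have hfun : ((fun x : Int => decide (|loc - PySem.List.pyGetD cl x 0| ≤ PySem.List.pyGetD cr x 0)) ∘
      (fun k : Nat => (k : Int))) = fun jn : Nat => decide (|loc - cl.getD jn 0| ≤ cr.getD jn 0) := by
    funext k
    simp [Function.comp]
  rw [hfun]
  rw [List.countP_eq_length_filter]
  simp [pvCovers]

-- B's outer loop in terms of the canonical sums
lemma pvAltLoop (cl cr : List Int) :
    ∀ (ts : List (Int × Int)) (cp : List Int) (s : Int), cp.length = cl.length →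
      (ts.foldl (pvAltStep cl cr) (cp, s)).1.length = cl.length ∧
      (∀ jn : Nat, jn < cl.length →
        (ts.foldl (pvAltStep cl cr) (cp, s)).1.getD jn 0 = cp.getD jn 0 + pvCloudPop cl cr ts jn) ∧
      (ts.foldl (pvAltStep cl cr) (cp, s)).2 = s + pvSunny cl cr ts := by
  intro ts
  induction ts with
  | nil => intro cp s h; simp [pvCloudPop, pvSunny, h]
  | cons pt ts ih =>
    intro cp s hlen
    have hstep : pvAltStep cl cr (cp, s) pt =
        if (pvCovers cl cr pt.2).length = 0 then (cp, s + pt.1)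
        else if (pvCovers cl cr pt.2).length = 1 then
          (PySem.List.pySetD cp
            (((pvCovers cl cr pt.2).map (fun jn : Nat => (jn : Int))).getLast?.getD (-1))
            (PySem.List.pyGetD cp
              (((pvCovers cl cr pt.2).map (fun jn : Nat => (jn : Int))).getLast?.getD (-1)) 0 + pt.1), s)
        else (cp, s) := by
      unfold pvAltStep
      rw [pvAltInner]
      simp only [Nat.cast_eq_zero, Nat.cast_eq_one]
    rcases hK : pvCovers cl cr pt.2 with - | ⟨j0, K'⟩
    · -- no covering cloud: the town is sunny
      simp only [List.foldl_cons, hstep, hK, List.length_nil, reduceIte]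
      obtain ⟨h1, h2, h3⟩ := ih cp (s + pt.1) hlen
      refine ⟨h1, ?_, ?_⟩
      · intro jn hjn
        rw [h2 jn hjn, pvCloudPop_cons, hK, if_neg (by simp)]
        ring
      · rw [h3, pvSunny_cons, hK, if_pos rfl]
        ring
    · rcases hK' : K' with - | ⟨j1, K''⟩
      · -- exactly one covering cloud j0
        subst hK'
        have hj0 : j0 < cl.length ∧ |pt.2 - cl.getD j0 0| ≤ cr.getD j0 0 :=
          (pvMem_covers cl cr pt.2 j0).mp (hK ▸ List.mem_cons_self)
        simp only [List.foldl_cons, hstep, hK, List.length_cons, List.length_nil, zero_add,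
          reduceIte, List.map_cons, List.map_nil, List.getLast?_cons,
          List.getLast?_nil, Option.getD_some, Option.getD_none]
        rw [PySem.List.pySetD_natCast]
        rw [if_neg (by decide : ¬ ((1 : Nat) = 0))]
        obtain ⟨h1, h2, h3⟩ := ih (cp.set j0 (PySem.List.pyGetD cp (j0 : Int) 0 + pt.1)) s
          (by simp [hlen])
        refine ⟨h1, ?_, ?_⟩
        · intro jn hjn
          rw [h2 jn hjn]
          have hget : (cp.set j0 (PySem.List.pyGetD cp (j0 : Int) 0 + pt.1)).getD jn 0 =
              if jn = j0 then cp.getD j0 0 + pt.1 else cp.getD jn 0 := by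
            have := PySem.List.pyGetD_pySetD_natCast cp j0 jn
              (PySem.List.pyGetD cp (j0 : Int) 0 + pt.1) 0 (hlen ▸ hj0.1)
            rw [PySem.List.pySetD_natCast] at this
            simpa using this
          rw [hget, pvCloudPop_cons, hK]
          by_cases hjj : jn = j0
          · subst hjj; rw [if_pos rfl, if_pos rfl]; ring
          · rw [if_neg hjj, if_neg (by simpa using fun hEq => hjj hEq.symm)]
            ring
        · rw [h3, pvSunny_cons, hK, if_neg (by simp)]
          ring
      · -- two or more covering clouds
        have hlen2 : (pvCovers cl cr pt.2).length ≠ 0 ∧ (pvCovers cl cr pt.2).length ≠ 1 := by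
          rw [hK, hK']; simp
        simp only [List.foldl_cons, hstep, if_neg hlen2.1, if_neg hlen2.2]
        obtain ⟨h1, h2, h3⟩ := ih cp s hlen
        refine ⟨h1, ?_, ?_⟩
        · intro jn hjn
          rw [h2 jn hjn, pvCloudPop_cons, if_neg (by rw [hK, hK']; simp)]
          ring
        · rw [h3, pvSunny_cons, if_neg (by rw [hK]; simp)]
          ring

-- pvTownsOf of the event list is the list of (population, location) pairs
lemma pvTownsOf_E (populations tl cl cr : List Int) :
    pvTownsOf (pvE populations tl cl cr) =
      (List.range populations.length).map (fun i => (populations.getD i 0, tl.getD i 0)) := by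
  unfold pvE pvTownsOf
  rw [List.filterMap_append, List.filterMap_map]
  have h1 : ∀ L : List Nat, L.filterMap ((fun (e : Int × String × Int × Int) =>
      if e.2.1 = "town" then some (e.2.2.1, e.1) else none) ∘ pvTev populations tl) =
      L.map (fun i => (populations.getD i 0, tl.getD i 0)) := by
    intro L
    induction L with
    | nil => rfl
    | cons i L ih => simp [pvTev, Function.comp]
  have h2 : ∀ L : List Nat, ((L.flatMap (fun j => [pvSev cl cr j, pvEev cl cr j])).filterMap
      (fun (e : Int × String × Int × Int) =>
        if e.2.1 = "town" then some (e.2.2.1, e.1) else none)) = [] := by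
    intro L
    induction L with
    | nil => rfl
    | cons j L ih =>
      simp only [List.flatMap_cons, List.filterMap_append, ih, List.append_nil]
      simp [pvSev, pvEev]
  rw [h1, h2, List.append_nil]

-- zip under the length precondition
lemma pvZip_eq (populations tl : List Int) (h : populations.length ≤ tl.length) :
    populations.zip tl =
      (List.range populations.length).map (fun i => (populations.getD i 0, tl.getD i 0)) := by
  apply List.ext_getElem
  · simp [List.length_zip]; omega
  · intro i h1 h2
    have hi : i < populations.length := by
      have := h1; simp [List.length_zip] at this; omega
    have hi' : i < tl.length := lt_of_lt_of_le hi h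
    simp only [List.getElem_zip, List.getElem_map, List.getElem_range]
    rw [List.getD_eq_getElem populations 0 hi, List.getD_eq_getElem tl 0 hi']

-- ===== VERDICT (by name: the statement is the Claim_ definition above) =====
theorem maximumPeople_spec : Claim_equal_maximumPeople := by
  intro populations town_locations cloud_locations cloud_ranges _ hPre
  obtain ⟨hlen1, hlen2, hcr⟩ := hPre
  unfold Spec_maximumPeople
  -- A's port, written over the abstract event list
  have hA_eq : maximumPeople populations town_locations cloud_locations cloud_ranges =
      ((PySem.List.sorted (pvE populations town_locations cloud_locations cloud_ranges)
          pvEventKey).foldl pvStep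
          (PySem.Set.empty, List.replicate cloud_locations.length 0, 0)).2.2 +
        PySem.List.maxD ((PySem.List.sorted (pvE populations town_locations cloud_locations
          cloud_ranges) pvEventKey).foldl pvStep
          (PySem.Set.empty, List.replicate cloud_locations.length 0, 0)).2.1 (fun x => x) 0 := by
    have hf : (fun i : Nat => (PySem.List.pyGetD town_locations (i : Int) 0, "town",
        PySem.List.pyGetD populations (i : Int) 0, (i : Int))) = pvTev populations town_locations := by
      funext i; simp [pvTev]
    have hg : (fun j : Nat =>
        [(PySem.List.pyGetD cloud_locations (j : Int) 0 - PySem.List.pyGetD cloud_ranges (j : Int) 0,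
          "cloud_start", (j : Int), (0 : Int)),
         (PySem.List.pyGetD cloud_locations (j : Int) 0 + PySem.List.pyGetD cloud_ranges (j : Int) 0 + 1,
          "cloud_end", (j : Int), (0 : Int))]) =
        fun j : Nat => [pvSev cloud_locations cloud_ranges j, pvEev cloud_locations cloud_ranges j] := by
      funext j; simp [pvSev, pvEev]
    simp only [maximumPeople]
    rw [PySem.List.foldl_append_singleton_eq_map, PySem.List.foldl_append_eq_flatMap,
      List.nil_append, hf, hg]
    rfl
  -- B's port is the pvAltStep fold
  have hB_eq : maximumPeople_alt populations town_locations cloud_locations cloud_ranges =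
      ((populations.zip town_locations).foldl (pvAltStep cloud_locations cloud_ranges)
          (List.replicate cloud_locations.length 0, 0)).2 +
        PySem.List.maxD ((populations.zip town_locations).foldl
          (pvAltStep cloud_locations cloud_ranges)
          (List.replicate cloud_locations.length 0, 0)).1 (fun x => x) 0 :=rfl
  set S := PySem.List.sorted (pvE populations town_locations cloud_locations cloud_ranges)
    pvEventKey with hSdef
  have hperm : S.Perm (pvE populations town_locations cloud_locations cloud_ranges) :=
    PySem.List.sorted_perm _ _ _
  have hmem : ∀ x, x ∈ S ↔ x ∈ pvE populations town_locations cloud_locations cloud_ranges :=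
    fun x => hperm.mem_iff
  have hp := pvSorted_pairwise_lt populations town_locations cloud_locations cloud_ranges
  -- the invariant at the start and hence at the end of A's sweep
  have hInit : pvInv cloud_locations cloud_ranges []
      (PySem.Set.empty, List.replicate cloud_locations.length 0, 0) := by
    refine ⟨by simp [PySem.Set.empty], by simp [PySem.Set.empty], by simp, ?_, by
      simp [pvTownsOf, pvSunny]⟩
    intro jn hjn
    simp [pvTownsOf, pvCloudPop]
  have hFin := pvFoldInv populations town_locations cloud_locations cloud_ranges hcr S hp hmem
    S [] _ (by simp) hInit
  rw [List.nil_append] at hFin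
  obtain ⟨-, -, hLA, hCPA, hSuA⟩ := hFin
  -- the town multiset seen by A is B's town list
  set towns := (List.range populations.length).map
    (fun i => (populations.getD i 0, town_locations.getD i 0)) with htownsdef
  have hTperm : (pvTownsOf S).Perm towns := by
    rw [htownsdef, ← pvTownsOf_E populations town_locations cloud_locations cloud_ranges]
    exact hperm.filterMap _
  have hCPperm : ∀ jn : Nat, pvCloudPop cloud_locations cloud_ranges (pvTownsOf S) jn =
      pvCloudPop cloud_locations cloud_ranges towns jn :=
    fun jn => (hTperm.map _).sum_eq
  have hSuperm : pvSunny cloud_locations cloud_ranges (pvTownsOf S) =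
      pvSunny cloud_locations cloud_ranges towns := (hTperm.map _).sum_eq
  -- B's fold, characterised
  have hB := pvAltLoop cloud_locations cloud_ranges towns
    (List.replicate cloud_locations.length 0) 0 (by simp)
  obtain ⟨hLB, hCPB, hSuB⟩ := hB
  rw [hA_eq, hB_eq, pvZip_eq populations town_locations hlen1, ← htownsdef]
  -- the two cloud-population lists are equal
  have hlists : (S.foldl pvStep
        (PySem.Set.empty, List.replicate cloud_locations.length 0, 0)).2.1 =
      (towns.foldl (pvAltStep cloud_locations cloud_ranges)
        (List.replicate cloud_locations.length 0, 0)).1 := by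
    apply List.ext_getElem (by rw [hLA, hLB])
    intro i h1 h2
    have hi : i < cloud_locations.length := by rw [← hLA]; exact h1
    rw [← List.getD_eq_getElem _ 0 h1, ← List.getD_eq_getElem _ 0 h2, hCPA i hi, hCPB i hi,
      hCPperm i, List.getD_replicate 0 hi, zero_add]
  rw [hlists, hSuA, hSuperm, hSuB, zero_add]
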